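-- pv_equiv track=rewrite | github.com/blakefren/FooBarChallenge | Level 2 pt 1.py | answer
-- ===== SOURCE A (Python) =====
-- def answer(names):
--     # This method takes a list of names and returns a descending sorted list based on the following two rules:
--     # 1. Each name's score is the sum of each letter's position in the alphabet (e.g.: a=1, b=2, c=3, etc.)
--     # 2. For names with identical scores, each name is ordered based on the score of the first letter (cx, then by, then az, etc.)
--
--     if names.count(names[0])==len(names): return names # If all names are the same, return the list
--     names=sorted(names,reverse=True) # Sort the name list reverse alphabetically; sets up for rule #2 above
--     letters=["a","b","c","d","e","f","g","h","i","j","k","l","m","n","o","p","q","r","s","t","u","v","w","x","y","z"]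
--
--     # Intiate lists for appending
--     scorelist = list()
--
--     # Loop through the name list; score
--     for a in names:
--         temp=0
--         if len(a)>0:
--             for char in a:
--                 temp+=letters.index(char)+1
--         scorelist.append(temp)
--
--     # Zip score and name lists, sort by score list; reverse alphabetical sorting is preserved from first sorting
--     final = [names for (scorelist, names) in sorted(zip(scorelist,names),key=lambda thing:thing[0],reverse=True)]
--
--     return final
-- ===== SOURCE B (Python) =====
-- def answer(names):
--     # Single-pass insertion sort: each name is scored once and inserted into its
--     # final position in an accumulator kept ordered by (score desc, name desc);
--     # no library sort, no zip/re-sort pipeline.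
--     letters = ["a","b","c","d","e","f","g","h","i","j","k","l","m","n","o",
--                "p","q","r","s","t","u","v","w","x","y","z"]
--
--     def score(name):
--         t = 0
--         for ch in name:
--             t += letters.index(ch) + 1
--         return t
--
--     ordered = []  # list of (score, name), kept sorted: score desc, then name desc
--     for name in names:
--         s = score(name)
--         i = 0
--         while i < len(ordered) and (ordered[i][0] > s or
--                                     (ordered[i][0] == s and ordered[i][1] > name)):
--             i += 1
--         ordered.insert(i, (s, name))
--     return [name for _, name in ordered]
-- ===== Notes on version B (the rewrite author's own statement) =====
-- stated objective: alternative
-- what changed: Replaces A's pipeline (all-equal early return, reverse-alphabetical library sort, separate score-list build, zip and stable library re-sort by score) with a hand-written single-pass insertion sort that scores each name once and inserts it directly into its final (score desc, name desc) position; it trades the O(n log n) library sorts for an O(n^2) single pass with no sort calls.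
-- outside the precondition, e.g. on answer(['A']): A returns ['A'], B raises ValueError
import Mathlib
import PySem

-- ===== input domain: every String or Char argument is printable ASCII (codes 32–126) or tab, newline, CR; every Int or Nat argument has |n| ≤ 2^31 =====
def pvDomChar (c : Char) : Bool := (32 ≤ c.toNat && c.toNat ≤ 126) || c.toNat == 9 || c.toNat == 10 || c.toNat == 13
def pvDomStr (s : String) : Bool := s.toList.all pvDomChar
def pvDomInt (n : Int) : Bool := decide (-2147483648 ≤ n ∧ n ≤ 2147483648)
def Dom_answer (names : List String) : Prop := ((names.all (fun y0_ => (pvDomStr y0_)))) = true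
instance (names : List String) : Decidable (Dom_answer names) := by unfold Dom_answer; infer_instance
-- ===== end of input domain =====

-- B replaces A's pipeline (early return, reverse-alphabetical library sort, score list,
-- zip, stable library re-sort) with a single-pass hand-written insertion sort on
-- (score desc, name desc); objective: alternative (return-value equivalence).

-- ===== PORT A =====
def pvLetters : List Char :=
  ['a','b','c','d','e','f','g','h','i','j','k','l','m','n','o','p','q','r','s','t','u','v','w','x','y','z']

def answer (names : List String) : List String :=
  match PySem.List.pyGet? names 0 with
  | none => []  -- names[0] raises IndexError (names = []); excluded by Pre_answer
  | some first =>
    if PySem.List.count names first = names.length then names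
    else
      let names2 := PySem.List.sorted names (fun n => n) true
      let scorelist : List Int := names2.foldl (fun sl a =>
        let temp : Int := 0
        let temp := if a.toList.length > 0 then
            -- letters.index(char) raises ValueError when char ∉ a..z; those inputs are
            -- outside Pre_answer, the port's .getD 0 default is never reached there
            a.toList.foldl (fun t ch => t + (((PySem.List.index? pvLetters ch).getD 0 : Int) + 1)) temp
          else temp
        sl ++ [temp]) []
      (PySem.List.sorted (scorelist.zip names2) (fun t => t.1) true).map (fun t => t.2)

-- ===== PORT B =====
def scoreB (name : String) : Int :=
  -- B's score loop: t += letters.index(ch) + 1; .getD 0 unreachable inside Pre_answer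
  name.toList.foldl (fun t ch => t + (((PySem.List.index? pvLetters ch).getD 0 : Int) + 1)) 0

def insertPair (s : Int) (name : String) : List (Int × String) → List (Int × String)
  -- Source B's while-scan + list.insert: walk past entries strictly before (s, name)
  | [] => [(s, name)]
  | (t, m) :: rest =>
      if s < t ∨ (t = s ∧ name < m) then (t, m) :: insertPair s name rest
      else (s, name) :: (t, m) :: rest

def answer_alt (names : List String) : List String :=
  (names.foldl (fun acc n => insertPair (scoreB n) n acc) []).map (fun p => p.2)

-- ===== PRECONDITION & SPEC =====
-- Pre_ excludes the empty list (names[0] raises IndexError in A) and lists containing a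
-- character outside a..z: A raises ValueError on those — except when all names are equal,
-- where A's early return accidentally skips scoring; B's own scoring naturally raises
-- ValueError there, so those inputs are excluded too.
def Pre_answer (names : List String) : Prop :=
  names ≠ [] ∧ (names.all (fun s => s.toList.all (fun c => decide ('a' ≤ c) && decide (c ≤ 'z')))) = true
instance (names : List String) : Decidable (Pre_answer names) := by unfold Pre_answer; infer_instance

def pvWitness_answer : List String := (["ba", "ac"])

def Spec_answer (names : List String) (out : List String) : Prop := out = answer_alt names
instance (names : List String) (out : List String) : Decidable (Spec_answer names out) := by unfold Spec_answer; infer_instance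

-- ===== CLAIM (what is proved, stated in full; the proofs are below) =====
def Claim_equal_answer : Prop := ∀ (names : List String), Dom_answer names → Pre_answer names → Spec_answer names (answer names)

-- ===== LEMMAS AND PROOFS =====

-- T is the target order of both programs: score descending, ties by name descending.
def pvT (a b : String) : Prop := scoreB b < scoreB a ∨ (scoreB a = scoreB b ∧ b ≤ a)

theorem pvT_antisymm (a b : String) : pvT a b → pvT b a → a = b := by
  rintro (h1 | ⟨h1, h1'⟩) (h2 | ⟨h2, h2'⟩) <;> first
    | exact absurd h1 (not_lt_of_gt h2)
    | exact absurd h1 (by omega)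
    | exact absurd h2 (by omega)
    | exact le_antisymm h2' h1'

-- the pair order maintained by B's accumulator: score descending, name descending
def pvP (p q : Int × String) : Prop := q.1 < p.1 ∨ (p.1 = q.1 ∧ q.2 ≤ p.2)

theorem pvP_trans (a b c : Int × String) : pvP a b → pvP b c → pvP a c := by
  rintro (h1 | ⟨h1, h1'⟩) (h2 | ⟨h2, h2'⟩)
  · exact Or.inl (lt_trans h2 h1)
  · exact Or.inl (h2 ▸ h1)
  · exact Or.inl (h1 ▸ h2)
  · exact Or.inr ⟨h1.trans h2, le_trans h2' h1'⟩

theorem insertPair_perm (s : Int) (name : String) (l : List (Int × String)) :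
    (insertPair s name l).Perm ((s, name) :: l) := by
  induction l with
  | nil => simp [insertPair]
  | cons p rest ih =>
    obtain ⟨t, m⟩ := p
    rw [insertPair]
    split_ifs with h
    · exact ((ih.cons (t, m)).trans (List.Perm.swap _ _ _))
    · exact List.Perm.refl _

theorem mem_insertPair (s : Int) (name : String) (l : List (Int × String)) (x : Int × String) :
    x ∈ insertPair s name l ↔ x = (s, name) ∨ x ∈ l := by
  rw [(insertPair_perm s name l).mem_iff]; simp

theorem insertPair_pairwise (s : Int) (name : String) (l : List (Int × String))
    (h : l.Pairwise pvP) : (insertPair s name l).Pairwise pvP := by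
  induction l with
  | nil => simp [insertPair, List.pairwise_cons]
  | cons p rest ih =>
    obtain ⟨t, m⟩ := p
    rw [List.pairwise_cons] at h
    rw [insertPair]
    split_ifs with hc
    · refine List.Pairwise.cons ?_ (ih h.2)
      intro x hx
      rcases (mem_insertPair s name rest x).mp hx with rfl | hx
      · -- (t,m) strictly before (s,name)
        rcases hc with h1 | ⟨h1, h2⟩
        · exact Or.inl h1
        · exact Or.inr ⟨h1, le_of_lt h2⟩
      · exact h.1 x hx
    · have ht : ¬ s < t := fun h' => hc (Or.inl h')
      have hnm : ¬ (t = s ∧ name < m) := fun h' => hc (Or.inr h')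
      have hnew : pvP (s, name) (t, m) := by
        rcases lt_or_eq_of_le (not_lt.mp ht) with h1 | h1
        · exact Or.inl h1
        · exact Or.inr ⟨h1.symm, not_lt.mp (fun h' => hnm ⟨h1, h'⟩)⟩
      refine List.Pairwise.cons ?_ (List.Pairwise.cons h.1 h.2)
      intro x hx
      rcases List.mem_cons.mp hx with rfl | hx
      · exact hnew
      · exact pvP_trans _ _ _ hnew (h.1 x hx)

-- B's accumulator fold: a pvP-pairwise permutation of the decorated input
theorem alt_fold_inv (names : List String) :
    (names.foldl (fun acc n => insertPair (scoreB n) n acc) []).Pairwise pvP ∧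
    (names.foldl (fun acc n => insertPair (scoreB n) n acc) []).Perm
      (names.map (fun n => (scoreB n, n))) := by
  suffices h : ∀ (acc : List (Int × String)), acc.Pairwise pvP →
      (names.foldl (fun acc n => insertPair (scoreB n) n acc) acc).Pairwise pvP ∧
      (names.foldl (fun acc n => insertPair (scoreB n) n acc) acc).Perm
        (acc ++ names.map (fun n => (scoreB n, n))) by
    simpa using h [] (by simp)
  induction names with
  | nil => intro acc hacc; exact ⟨hacc, by simp⟩
  | cons n ns ih =>
    intro acc hacc
    simp only [List.foldl_cons, List.map_cons]
    obtain ⟨h1, h2⟩ := ih (insertPair (scoreB n) n acc) (insertPair_pairwise _ _ _ hacc)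
    refine ⟨h1, h2.trans ?_⟩
    have p1 : (insertPair (scoreB n) n acc ++ ns.map (fun n => (scoreB n, n))).Perm
        (((scoreB n, n) :: acc) ++ ns.map (fun n => (scoreB n, n))) :=
      (insertPair_perm _ _ _).append_right _
    exact p1.trans List.perm_middle.symm

theorem alt_pairwise (names : List String) : (answer_alt names).Pairwise pvT := by
  obtain ⟨h1, h2⟩ := alt_fold_inv names
  rw [answer_alt, List.pairwise_map]
  have hmem : ∀ x ∈ names.foldl (fun acc n => insertPair (scoreB n) n acc) [],
      x.1 = scoreB x.2 := by
    intro x hx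
    have := h2.mem_iff.mp hx
    rw [List.mem_map] at this
    rcases this with ⟨n, _, rfl⟩; rfl
  refine h1.imp_of_mem ?_
  intro p q hp hq hpq
  rcases hpq with h | ⟨h, h'⟩
  · exact Or.inl (by rw [← hmem p hp, ← hmem q hq]; exact h)
  · exact Or.inr ⟨by rw [← hmem p hp, ← hmem q hq]; exact h, h'⟩

theorem alt_perm (names : List String) : (answer_alt names).Perm names := by
  obtain ⟨_, h2⟩ := alt_fold_inv names
  have := h2.map (fun p : Int × String => p.2)
  rw [answer_alt]
  simpa [Function.comp_def] using this

-- generic: stable insertion preserves pairwise-sortedness (used for A's two sorts)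
theorem pairwise_insertBy_stable {α : Type} (before : α → α → Bool) (S : α → α → Prop)
    (x : α) (ys : List α)
    (h1 : ys.Pairwise S)
    (h2 : ∀ y ∈ ys, before x y = true → S x y)
    (h3 : ∀ y ∈ ys, before x y = false → S y x)
    (g4 : ∀ y z, before x y = true → S y z → S x z) :
    (PySem.List.insertBy before x ys).Pairwise S := by
  induction ys with
  | nil => simp [PySem.List.insertBy]
  | cons y ys ih =>
    rw [List.pairwise_cons] at h1
    rw [PySem.List.insertBy.eq_2]
    by_cases hb : before x y = true
    · rw [if_pos hb]
      refine List.Pairwise.cons ?_ (List.Pairwise.cons h1.1 h1.2)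
      intro z hz
      rcases List.mem_cons.mp hz with h | hz
      · subst h; exact h2 z (by simp) hb
      · exact g4 y z hb (h1.1 z hz)
    · rw [Bool.not_eq_true] at hb
      rw [if_neg (by simp [hb])]
      refine List.Pairwise.cons ?_ ?_
      · intro z hz
        rcases (PySem.List.mem_insertBy before x z ys).mp hz with h | hz
        · subst h; exact h3 y (by simp) hb
        · exact h1.1 z hz
      · exact ih h1.2 (fun y hy => h2 y (by simp [hy])) (fun y hy => h3 y (by simp [hy]))

-- generic: a stable insertion-sort fold is pairwise-sorted by S, where S may use the
-- original order Q to break ties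
theorem pairwise_foldl_insertBy_stable {α : Type} (before : α → α → Bool) (S Q : α → α → Prop)
    (g2 : ∀ x y, Q y x → before x y = true → S x y)
    (g3 : ∀ x y, Q y x → before x y = false → S y x)
    (g4 : ∀ x y z, before x y = true → S y z → S x z)
    (xs : List α) (hxs : xs.Pairwise Q) :
    ∀ (acc : List α), acc.Pairwise S → (∀ y ∈ acc, ∀ x ∈ xs, Q y x) →
    (xs.foldl (fun acc x => PySem.List.insertBy before x acc) acc).Pairwise S := by
  induction xs with
  | nil => intro acc hacc _; simpa using hacc
  | cons x xs ih =>
    intro acc hacc hQ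
    rw [List.pairwise_cons] at hxs
    simp only [List.foldl_cons]
    refine ih hxs.2 _ ?_ ?_
    · exact pairwise_insertBy_stable before S x acc hacc
        (fun y hy => g2 x y (hQ y hy x (by simp)))
        (fun y hy => g3 x y (hQ y hy x (by simp)))
        (g4 x)
    · intro y hy x' hx'
      rcases (PySem.List.mem_insertBy before x y acc).mp hy with rfl | hy
      · exact hxs.1 x' hx'
      · exact hQ y hy x' (by simp [hx'])

-- S' : the pair order of A's second sort (score descending, ties keep name-descending order)
def pvS (p q : Int × String) : Prop := q.1 < p.1 ∨ (p.1 = q.1 ∧ q.2 ≤ p.2)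

-- A's scoring loop computes scoreB
theorem scorelist_eq (l : List String) :
    l.foldl (fun sl a =>
      let temp : Int := 0
      let temp := if a.toList.length > 0 then
          a.toList.foldl (fun t ch => t + (((PySem.List.index? pvLetters ch).getD 0 : Int) + 1)) temp
        else temp
      sl ++ [temp]) [] = l.map scoreB := by
  have : ∀ a : String,
      (let temp : Int := 0
       let temp := if a.toList.length > 0 then
          a.toList.foldl (fun t ch => t + (((PySem.List.index? pvLetters ch).getD 0 : Int) + 1)) temp
        else temp
       temp) = scoreB a := by
    intro a
    simp only [scoreB]
    split_ifs with h
    · rfl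
    · have : a.toList = [] := by
        cases hl : a.toList with
        | nil => rfl
        | cons c cs => rw [hl] at h; simp at h
      simp [this]
  have hfun : (fun (sl : List Int) (a : String) =>
      let temp : Int := 0
      let temp := if a.toList.length > 0 then
          a.toList.foldl (fun t ch => t + (((PySem.List.index? pvLetters ch).getD 0 : Int) + 1)) temp
        else temp
      sl ++ [temp]) = (fun sl a => sl ++ [scoreB a]) := by
    funext sl a; simp only [this]
  rw [hfun, PySem.List.foldl_append_singleton_eq_map]; simp

-- A's result is pairwise-sorted by pvT and a permutation of names
theorem a_pairwise_perm (names : List String) (first : String)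
    (hget : PySem.List.pyGet? names 0 = some first)
    (hne : ¬ PySem.List.count names first = names.length) :
    (answer names).Pairwise pvT ∧ (answer names).Perm names := by
  rw [answer, hget]
  dsimp only
  rw [if_neg hne]
  rw [scorelist_eq]
  have hzip : ∀ l : List String, (l.map scoreB).zip l = l.map (fun n => (scoreB n, n)) := by
    intro l; induction l with
    | nil => rfl
    | cons a l ih => simp [ih]
  rw [hzip]
  set ns2 := PySem.List.sorted names (fun n => n) true with hns2
  set zipped := ns2.map (fun n => (scoreB n, n)) with hzip2
  have hQ : zipped.Pairwise (fun p q : Int × String => q.2 ≤ p.2) := by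
    rw [hzip2, List.pairwise_map]
    exact (PySem.List.sorted_pairwise_rev names (fun n => n)).imp (fun h => h)
  have hsortS : (PySem.List.sorted zipped (fun t => t.1) true).Pairwise pvS := by
    rw [PySem.List.sorted_rev_eq_foldl_insertBy]
    refine pairwise_foldl_insertBy_stable _ pvS (fun p q : Int × String => q.2 ≤ p.2)
      ?_ ?_ ?_ zipped hQ [] (by simp) (by simp)
    · intro x y _ h; simp only [decide_eq_true_eq] at h; exact Or.inl h
    · intro x y hq h
      simp only [decide_eq_false_iff_not, not_lt] at h
      rcases lt_or_eq_of_le h with h | h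
      · exact Or.inl h
      · exact Or.inr ⟨h.symm, hq⟩
    · intro x y z h hyz
      simp only [decide_eq_true_eq] at h
      rcases hyz with h2 | ⟨h2, _⟩
      · exact Or.inl (lt_trans h2 h)
      · exact Or.inl (h2 ▸ h)
  constructor
  · rw [List.pairwise_map]
    refine hsortS.imp_of_mem ?_
    intro p q hp hq hS
    have hmem : ∀ r : Int × String, r ∈ PySem.List.sorted zipped (fun t => t.1) true →
        r.1 = scoreB r.2 := by
      intro r hr
      rw [PySem.List.mem_sorted, hzip2, List.mem_map] at hr
      rcases hr with ⟨n, _, rfl⟩; rfl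
    rcases hS with h | ⟨h, h'⟩
    · exact Or.inl (by rw [← hmem p hp, ← hmem q hq]; exact h)
    · exact Or.inr ⟨by rw [← hmem p hp, ← hmem q hq]; exact h, h'⟩
  · have h1 : (PySem.List.sorted zipped (fun t => t.1) true).Perm zipped :=
      PySem.List.sorted_perm zipped (fun t => t.1) true
    have h2 := h1.map (fun t : Int × String => t.2)
    have h3 : zipped.map (fun t : Int × String => t.2) = ns2 := by
      rw [hzip2, List.map_map]; simp [Function.comp_def]
    rw [h3] at h2
    exact h2.trans (PySem.List.sorted_perm names (fun n => n) true)

-- two pvT-pairwise permutations of the same list are equal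
theorem pvT_unique {l1 l2 : List String} (hp : l1.Perm l2)
    (h1 : l1.Pairwise pvT) (h2 : l2.Pairwise pvT) : l1 = l2 :=
  List.Perm.eq_of_pairwise (fun a b _ _ hab hba => pvT_antisymm a b hab hba) h1 h2 hp

theorem answer_eq_alt (names : List String) : answer names = answer_alt names := by
  have haltp : (answer_alt names).Perm names := alt_perm names
  cases hget : PySem.List.pyGet? names 0 with
  | none =>
    have hnil : names = [] := by
      cases names with
      | nil => rfl
      | cons a l => simp [PySem.List.pyGet?, PySem.List.pyIdx?] at hget
    subst hnil
    rfl
  | some first =>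
    by_cases hc : PySem.List.count names first = names.length
    · -- all names equal: A returns names unchanged; B's insertion leaves it unchanged too
      have hall : ∀ b ∈ names, first = b :=
        List.count_eq_length.mp (by simpa [PySem.List.count] using hc)
      have hpw : names.Pairwise pvT := by
        refine List.pairwise_iff_forall_sublist.mpr ?_
        intro a b hs
        have ha := hall a (hs.subset (by simp))
        have hb := hall b (hs.subset (by simp))
        rw [← ha, ← hb]
        exact Or.inr ⟨rfl, le_refl _⟩
      have : answer names = names := by rw [answer, hget]; dsimp only; rw [if_pos hc]
      rw [this]
      exact pvT_unique haltp.symm hpw (alt_pairwise names)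
    · obtain ⟨hpw, hperm⟩ := a_pairwise_perm names first hget hc
      exact pvT_unique (hperm.trans haltp.symm) hpw (alt_pairwise names)

-- ===== VERDICT (by name: the statement is the Claim_ definition above) =====
theorem answer_spec : Claim_equal_answer := by
  intro names _ _
  unfold Spec_answer
  exact answer_eq_alt names
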